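-- pv_equiv track=rewrite | github.com/paulklemstine/factor | lean/misc/Pythagorean/QuadDivision_Experiments.py | all_triples_with_leg
-- ===== SOURCE A (Python) =====
-- import math
--
-- def all_triples_with_leg(N, max_search=10000):
--     """Find all primitive Pythagorean triples with N as a leg, up to search bound."""
--     triples = []
--     # N = a: find b,c with a² + b² = c², i.e., c² - b² = N², (c-b)(c+b) = N²
--     N2 = N * N
--     for d in range(1, int(math.isqrt(N2)) + 1):
--         if N2 % d == 0:
--             e = N2 // d
--             # c - b = d, c + b = e, need d < e and same parity
--             if d < e and (d + e) % 2 == 0: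
--                 c = (d + e) // 2
--                 b = (e - d) // 2
--                 if b > 0 and N*N + b*b == c*c:
--                     g = math.gcd(math.gcd(N, b), c)
--                     triples.append((N, b, c, g))
--     return triples
-- ===== SOURCE B (Python) =====
-- import math
--
-- def all_triples_with_leg(N, max_search=10000):
--     """Find all primitive Pythagorean triples with N as a leg, up to search bound."""
--     n = abs(N)
--     # divisors of n via trial division up to sqrt(n)
--     small = []
--     for i in range(1, math.isqrt(n) + 1):
--         if n % i == 0:
--             small.append(i)
--             small.append(n // i)
--     # every divisor of n^2 is a product of two divisors of n
--     N2 = N * N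
--     triples = []
--     for d in sorted({a * b for a in small for b in small}):
--         e = N2 // d
--         if d < e and (d + e) % 2 == 0:
--             c = (d + e) // 2
--             b = (e - d) // 2
--             triples.append((N, b, c, math.gcd(math.gcd(N, b), c)))
--     return triples
-- ===== Notes on version B (the rewrite author's own statement) =====
-- stated objective: faster
-- what changed: Instead of scanning every candidate d in range(1, N) and testing N^2 % d, B factor-enumerates: it collects the divisors of |N| by trial division up to sqrt(|N|), forms the set of pairwise products (which is exactly the set of divisors of N^2), sorts it, and applies the parity/ordering test to each divisor; the redundant b>0 and square re-check of A are dropped as they always hold.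
import Mathlib
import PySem

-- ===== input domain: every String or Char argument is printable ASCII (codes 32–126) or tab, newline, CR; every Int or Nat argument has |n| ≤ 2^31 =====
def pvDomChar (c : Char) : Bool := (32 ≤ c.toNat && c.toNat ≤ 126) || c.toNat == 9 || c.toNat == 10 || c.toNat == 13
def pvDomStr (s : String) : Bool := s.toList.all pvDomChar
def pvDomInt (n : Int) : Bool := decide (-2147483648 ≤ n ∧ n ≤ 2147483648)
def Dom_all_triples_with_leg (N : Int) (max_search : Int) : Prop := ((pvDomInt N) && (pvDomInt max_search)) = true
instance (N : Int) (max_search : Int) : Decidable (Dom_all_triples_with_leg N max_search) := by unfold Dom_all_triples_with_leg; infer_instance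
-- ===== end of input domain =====

-- B replaces A's O(N) scan for divisors of N² by trial division of |N| up to √|N| plus pairwise
-- products of the found divisors (objective: faster; a timing run measured the speed-up).

-- ===== PORT A =====
-- math.isqrt(x) for x = N*N ≥ 0 is exactly Nat.sqrt x.toNat; math.gcd is the nonnegative Int.gcd.
def all_triples_with_leg (N : Int) (max_search : Int) : List (List Int) :=
  let N2 := N * N
  (PySem.List.pyRange 1 ((N2.toNat.sqrt : Int) + 1)).foldl (fun triples d =>
    if PySem.Int.mod N2 d = 0 then
      let e := PySem.Int.floordiv N2 d
      if d < e ∧ PySem.Int.mod (d + e) 2 = 0 then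
        let c := PySem.Int.floordiv (d + e) 2
        let b := PySem.Int.floordiv (e - d) 2
        if 0 < b ∧ N * N + b * b = c * c then
          triples ++ [[N, b, c, ((Int.gcd ((Int.gcd N b : Nat) : Int) c : Nat) : Int)]]
        else triples
      else triples
    else triples) []

-- ===== PORT B =====
-- abs → |·|; the set comprehension {a*b for a in small for b in small} → Set.ofList of the product list.
def all_triples_with_leg_alt (N : Int) (max_search : Int) : List (List Int) :=
  let n := |N|
  let small := (PySem.List.pyRange 1 ((n.toNat.sqrt : Int) + 1)).foldl (fun small i =>
    if PySem.Int.mod n i = 0 then small ++ [i] ++ [PySem.Int.floordiv n i] else small) []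
  let N2 := N * N
  let ds := PySem.List.sorted (PySem.Set.ofList (small.flatMap (fun a => small.map (fun b => a * b)))) (fun x => x) false
  ds.foldl (fun triples d =>
    let e := PySem.Int.floordiv N2 d
    if d < e ∧ PySem.Int.mod (d + e) 2 = 0 then
      let c := PySem.Int.floordiv (d + e) 2
      let b := PySem.Int.floordiv (e - d) 2
      triples ++ [[N, b, c, ((Int.gcd ((Int.gcd N b : Nat) : Int) c : Nat) : Int)]]
    else triples) []

-- ===== PRECONDITION & SPEC =====
def Spec_all_triples_with_leg (N : Int) (max_search : Int) (out : List (List Int)) : Prop := out = all_triples_with_leg_alt N max_search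
instance (N : Int) (max_search : Int) (out : List (List Int)) : Decidable (Spec_all_triples_with_leg N max_search out) := by unfold Spec_all_triples_with_leg; infer_instance

-- ===== CLAIM (what is proved, stated in full; the proofs are below) =====
def Claim_equal_all_triples_with_leg : Prop := ∀ (N : Int) (max_search : Int), Dom_all_triples_with_leg N max_search → Spec_all_triples_with_leg N max_search (all_triples_with_leg N max_search)

-- ===== LEMMAS AND PROOFS =====


-- The triple built from divisor d of N², as both loop bodies build it (lets unfolded).
def pvStep (N d : Int) : List Int :=
  [N, PySem.Int.floordiv (PySem.Int.floordiv (N * N) d - d) 2,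
      PySem.Int.floordiv (d + PySem.Int.floordiv (N * N) d) 2,
      ((Int.gcd ((Int.gcd N (PySem.Int.floordiv (PySem.Int.floordiv (N * N) d - d) 2) : Nat) : Int)
                (PySem.Int.floordiv (d + PySem.Int.floordiv (N * N) d) 2) : Nat) : Int)]

-- B's loop test, as a Bool predicate on d.
def pvPB (N d : Int) : Bool :=
  decide (d < PySem.Int.floordiv (N * N) d ∧ PySem.Int.mod (d + PySem.Int.floordiv (N * N) d) 2 = 0)

-- A's composite loop test.
def pvPA (N d : Int) : Bool :=
  decide (PySem.Int.mod (N * N) d = 0) &&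
  (pvPB N d &&
   decide (0 < PySem.Int.floordiv (PySem.Int.floordiv (N * N) d - d) 2 ∧
           N * N + PySem.Int.floordiv (PySem.Int.floordiv (N * N) d - d) 2 *
                     PySem.Int.floordiv (PySem.Int.floordiv (N * N) d - d) 2 =
             PySem.Int.floordiv (d + PySem.Int.floordiv (N * N) d) 2 *
               PySem.Int.floordiv (d + PySem.Int.floordiv (N * N) d) 2))

-- B's divisor-collecting loop, as a flatMap.
def pvSmall (N : Int) : List Int :=
  (PySem.List.pyRange 1 ((|N|.toNat.sqrt : Int) + 1)).flatMap
    (fun i => if PySem.Int.mod |N| i = 0 then [i, PySem.Int.floordiv |N| i] else [])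

def pvProds (N : Int) : List Int := (pvSmall N).flatMap (fun a => (pvSmall N).map (fun b => a * b))

lemma pvA_fold (N : Int) (l : List Int) (acc : List (List Int)) :
    l.foldl (fun triples d =>
      if PySem.Int.mod (N * N) d = 0 then
        if d < PySem.Int.floordiv (N * N) d ∧ PySem.Int.mod (d + PySem.Int.floordiv (N * N) d) 2 = 0 then
          if 0 < PySem.Int.floordiv (PySem.Int.floordiv (N * N) d - d) 2 ∧
             N * N + PySem.Int.floordiv (PySem.Int.floordiv (N * N) d - d) 2 *
                       PySem.Int.floordiv (PySem.Int.floordiv (N * N) d - d) 2 =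
               PySem.Int.floordiv (d + PySem.Int.floordiv (N * N) d) 2 *
                 PySem.Int.floordiv (d + PySem.Int.floordiv (N * N) d) 2 then
          triples ++ [[N, PySem.Int.floordiv (PySem.Int.floordiv (N * N) d - d) 2,
            PySem.Int.floordiv (d + PySem.Int.floordiv (N * N) d) 2,
            ((Int.gcd ((Int.gcd N (PySem.Int.floordiv (PySem.Int.floordiv (N * N) d - d) 2) : Nat) : Int)
                (PySem.Int.floordiv (d + PySem.Int.floordiv (N * N) d) 2) : Nat) : Int)]]
          else triples
        else triples
      else triples) acc = acc ++ (l.filter (pvPA N)).map (pvStep N) := by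
  have hb : ∀ (triples : List (List Int)) (d : Int), (if PySem.Int.mod (N * N) d = 0 then
      if d < PySem.Int.floordiv (N * N) d ∧ PySem.Int.mod (d + PySem.Int.floordiv (N * N) d) 2 = 0 then
        if 0 < PySem.Int.floordiv (PySem.Int.floordiv (N * N) d - d) 2 ∧
           N * N + PySem.Int.floordiv (PySem.Int.floordiv (N * N) d - d) 2 *
                     PySem.Int.floordiv (PySem.Int.floordiv (N * N) d - d) 2 =
             PySem.Int.floordiv (d + PySem.Int.floordiv (N * N) d) 2 *
               PySem.Int.floordiv (d + PySem.Int.floordiv (N * N) d) 2 then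
        triples ++ [[N, PySem.Int.floordiv (PySem.Int.floordiv (N * N) d - d) 2,
          PySem.Int.floordiv (d + PySem.Int.floordiv (N * N) d) 2,
          ((Int.gcd ((Int.gcd N (PySem.Int.floordiv (PySem.Int.floordiv (N * N) d - d) 2) : Nat) : Int)
              (PySem.Int.floordiv (d + PySem.Int.floordiv (N * N) d) 2) : Nat) : Int)]]
        else triples
      else triples
    else triples) = if pvPA N d = true then triples ++ [pvStep N d] else triples := by
    intro triples d
    simp only [pvPA, pvPB, pvStep, Bool.and_eq_true, decide_eq_true_eq]
    try (split_ifs <;> first | rfl | tauto)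
  simp only [hb]
  exact PySem.List.foldl_append_if (pvPA N) (pvStep N) l acc

lemma pvA_shape (N ms : Int) :
    all_triples_with_leg N ms =
      ((PySem.List.pyRange 1 ((((N * N).toNat.sqrt : Nat) : Int) + 1)).filter (pvPA N)).map (pvStep N) := by
  exact (pvA_fold N _ []).trans (List.nil_append _)

lemma pvB_fold (N : Int) (l : List Int) (acc : List (List Int)) :
    l.foldl (fun triples d =>
      if d < PySem.Int.floordiv (N * N) d ∧ PySem.Int.mod (d + PySem.Int.floordiv (N * N) d) 2 = 0 then
        triples ++ [[N, PySem.Int.floordiv (PySem.Int.floordiv (N * N) d - d) 2,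
          PySem.Int.floordiv (d + PySem.Int.floordiv (N * N) d) 2,
          ((Int.gcd ((Int.gcd N (PySem.Int.floordiv (PySem.Int.floordiv (N * N) d - d) 2) : Nat) : Int)
              (PySem.Int.floordiv (d + PySem.Int.floordiv (N * N) d) 2) : Nat) : Int)]]
      else triples) acc = acc ++ (l.filter (pvPB N)).map (pvStep N) := by
  have hb : ∀ (triples : List (List Int)) (d : Int),
      (if d < PySem.Int.floordiv (N * N) d ∧ PySem.Int.mod (d + PySem.Int.floordiv (N * N) d) 2 = 0 then
        triples ++ [[N, PySem.Int.floordiv (PySem.Int.floordiv (N * N) d - d) 2,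
          PySem.Int.floordiv (d + PySem.Int.floordiv (N * N) d) 2,
          ((Int.gcd ((Int.gcd N (PySem.Int.floordiv (PySem.Int.floordiv (N * N) d - d) 2) : Nat) : Int)
              (PySem.Int.floordiv (d + PySem.Int.floordiv (N * N) d) 2) : Nat) : Int)]]
      else triples) = if pvPB N d = true then triples ++ [pvStep N d] else triples := by
    intro triples d
    simp only [pvPB, pvStep, decide_eq_true_eq]
  simp only [hb]
  exact PySem.List.foldl_append_if (pvPB N) (pvStep N) l acc

lemma pvSmall_fold (N : Int) (l : List Int) (acc : List Int) :
    l.foldl (fun small i =>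
      if PySem.Int.mod |N| i = 0 then small ++ [i] ++ [PySem.Int.floordiv |N| i] else small) acc
      = acc ++ l.flatMap (fun i => if PySem.Int.mod |N| i = 0 then [i, PySem.Int.floordiv |N| i] else []) := by
  have hb : ∀ (small : List Int) (i : Int),
      (if PySem.Int.mod |N| i = 0 then small ++ [i] ++ [PySem.Int.floordiv |N| i] else small)
        = small ++ (if PySem.Int.mod |N| i = 0 then [i, PySem.Int.floordiv |N| i] else []) := by
    intro small i
    split_ifs <;> simp
  simp only [hb]
  exact PySem.List.foldl_append_eq_flatMap _ l acc

lemma pvB_shape (N ms : Int) :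
    all_triples_with_leg_alt N ms =
      ((PySem.List.sorted (PySem.Set.ofList (pvProds N)) (fun x => x) false).filter (pvPB N)).map (pvStep N) := by
  have hs : (PySem.List.pyRange 1 ((|N|.toNat.sqrt : Int) + 1)).foldl (fun small i =>
      if PySem.Int.mod |N| i = 0 then small ++ [i] ++ [PySem.Int.floordiv |N| i] else small) [] = pvSmall N :=
    (pvSmall_fold N _ []).trans (List.nil_append _)
  show (PySem.List.sorted (PySem.Set.ofList (((PySem.List.pyRange 1 ((|N|.toNat.sqrt : Int) + 1)).foldl (fun small i =>
      if PySem.Int.mod |N| i = 0 then small ++ [i] ++ [PySem.Int.floordiv |N| i] else small) []).flatMap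
      (fun a => ((PySem.List.pyRange 1 ((|N|.toNat.sqrt : Int) + 1)).foldl (fun small i =>
      if PySem.Int.mod |N| i = 0 then small ++ [i] ++ [PySem.Int.floordiv |N| i] else small) []).map (fun b => a * b))))
      (fun x => x) false).foldl _ [] = _
  rw [hs]
  exact (pvB_fold N _ []).trans (List.nil_append _)

lemma pv_nat_split (m d : Nat) (h : d ∣ m * m) : ∃ a b : Nat, a ∣ m ∧ b ∣ m ∧ d = a * b := by
  rcases Nat.eq_zero_or_pos d with hd | hd
  · have hm : m = 0 := by
      have h0 : m * m = 0 := Nat.eq_zero_of_zero_dvd (hd ▸ h)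
      exact mul_self_eq_zero.mp h0
    exact ⟨0, 0, by simp [hm, hd]⟩
  · have hgpos : 0 < d.gcd m := Nat.gcd_pos_of_pos_left _ hd
    have hgd : d.gcd m ∣ d := Nat.gcd_dvd_left _ _
    have hgm : d.gcd m ∣ m := Nat.gcd_dvd_right _ _
    refine ⟨d.gcd m, d / d.gcd m, hgm, ?_, (Nat.mul_div_cancel' hgd).symm⟩
    have hco : (d / d.gcd m).Coprime (m / d.gcd m) := Nat.coprime_div_gcd_div_gcd hgpos
    have h1 : d.gcd m * (d / d.gcd m) ∣ d.gcd m * ((m / d.gcd m) * (d.gcd m * (m / d.gcd m))) := by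
      have : d.gcd m * ((m / d.gcd m) * (d.gcd m * (m / d.gcd m)))
          = (d.gcd m * (m / d.gcd m)) * (d.gcd m * (m / d.gcd m)) := by ring
      rw [this, Nat.mul_div_cancel' hgd, Nat.mul_div_cancel' hgm]
      exact h
    have h2 : d / d.gcd m ∣ (m / d.gcd m) * (d.gcd m * (m / d.gcd m)) :=
      (Nat.mul_dvd_mul_iff_left hgpos).mp h1
    have h3 : d / d.gcd m ∣ d.gcd m * (m / d.gcd m) := hco.dvd_of_dvd_mul_left h2
    have h4 : d / d.gcd m ∣ d.gcd m := hco.dvd_of_dvd_mul_right h3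
    exact h4.trans hgm

lemma pv_mem_small (N x : Int) (hm : 1 ≤ N.natAbs) :
    x ∈ pvSmall N ↔ 1 ≤ x ∧ x ∣ (N.natAbs : Int) := by
  have habs : |N| = (N.natAbs : Int) := Int.abs_eq_natAbs N
  have hm' : (0 : Int) < (N.natAbs : Int) := by exact_mod_cast hm
  simp only [pvSmall, List.mem_flatMap, PySem.List.mem_pyRange_one, habs, Int.toNat_natCast]
  constructor
  · rintro ⟨i, ⟨h1, h2⟩, hx⟩
    have hi0 : (0 : Int) < i := h1
    by_cases hdvd : PySem.Int.mod ((N.natAbs : Int)) i = 0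
    · have hidvd : i ∣ (N.natAbs : Int) := (PySem.Int.mod_eq_zero_iff_dvd _ _).mp hdvd
      rw [if_pos hdvd] at hx
      simp only [List.mem_cons, List.not_mem_nil, or_false] at hx
      rcases hx with hx | hx
      · exact ⟨hx ▸ h1, hx ▸ hidvd⟩
      · subst hx
        rw [PySem.Int.floordiv_eq_ediv_of_pos hi0]
        refine ⟨?_, ?_⟩
        · rw [Int.le_ediv_iff_mul_le hi0, one_mul]
          exact Int.le_of_dvd hm' hidvd
        · exact ⟨i, (Int.ediv_mul_cancel hidvd).symm⟩
    · rw [if_neg hdvd] at hx; cases hx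
  · rintro ⟨hx1, hxdvd⟩
    have hx0 : (0 : Int) < x := hx1
    have hxa : x = (x.toNat : Int) := (Int.toNat_of_nonneg hx0.le).symm
    have hadvd : x.toNat ∣ N.natAbs := by
      rw [hxa] at hxdvd; exact_mod_cast hxdvd
    have ha1 : 1 ≤ x.toNat := by omega
    have hxm : x.toNat ≤ N.natAbs := Nat.le_of_dvd (by omega) hadvd
    by_cases hle : x.toNat ≤ N.natAbs.sqrt
    · refine ⟨x, ⟨hx1, ?_⟩, ?_⟩
      · have : (x.toNat : Int) ≤ (N.natAbs.sqrt : Int) := by exact_mod_cast hle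
        omega
      · rw [if_pos ((PySem.Int.mod_eq_zero_iff_dvd _ _).mpr hxdvd)]
        simp
    · -- x is large: use the cofactor i = N.natAbs / x.toNat
      set a := x.toNat with hadef
      have hia : N.natAbs / a ∣ N.natAbs := Nat.div_dvd_of_dvd hadvd
      have hi1 : 1 ≤ N.natAbs / a := (Nat.one_le_div_iff (by omega)).mpr hxm
      have his : N.natAbs / a ≤ N.natAbs.sqrt := by
        by_contra hcon
        push_neg at hcon
        have h5 : N.natAbs.sqrt + 1 ≤ a := by omega
        have h6 : N.natAbs.sqrt + 1 ≤ N.natAbs / a := hcon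
        have h7 : a * (N.natAbs / a) = N.natAbs := Nat.mul_div_cancel' hadvd
        have h8 : N.natAbs < (N.natAbs.sqrt + 1) * (N.natAbs.sqrt + 1) := by
          have h9 := Nat.lt_succ_sqrt' N.natAbs
          simpa [Nat.succ_eq_add_one, pow_two] using h9
        nlinarith
      refine ⟨((N.natAbs / a : Nat) : Int), ⟨by exact_mod_cast hi1, by
        have : ((N.natAbs / a : Nat) : Int) ≤ (N.natAbs.sqrt : Int) := by exact_mod_cast his
        omega⟩, ?_⟩
      have hidvd : ((N.natAbs / a : Nat) : Int) ∣ (N.natAbs : Int) := by exact_mod_cast hia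
      rw [if_pos ((PySem.Int.mod_eq_zero_iff_dvd _ _).mpr hidvd)]
      have hpos : (0 : Int) < ((N.natAbs / a : Nat) : Int) := by exact_mod_cast hi1
      rw [PySem.Int.floordiv_eq_ediv_of_pos hpos]
      have : (N.natAbs : Int) / ((N.natAbs / a : Nat) : Int) = ((N.natAbs / (N.natAbs / a) : Nat) : Int) := by
        exact_mod_cast (Int.natCast_div _ _).symm
      rw [this, Nat.div_div_self hadvd (by omega)]
      exact List.mem_cons_of_mem _ (List.mem_singleton.mpr hxa)

lemma pv_mem_prods (N x : Int) (hm : 1 ≤ N.natAbs) :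
    x ∈ pvProds N ↔ 1 ≤ x ∧ x ∣ N * N := by
  have hNN : ((N.natAbs : Int)) * ((N.natAbs : Int)) = N * N := by
    exact_mod_cast Int.natAbs_mul_self (a := N)
  simp only [pvProds, List.mem_flatMap, List.mem_map]
  constructor
  · rintro ⟨a, ha, b, hb, rfl⟩
    rw [pv_mem_small N a hm] at ha
    rw [pv_mem_small N b hm] at hb
    refine ⟨?_, ?_⟩
    · nlinarith [ha.1, hb.1]
    · rw [← hNN]; exact mul_dvd_mul ha.2 hb.2
  · rintro ⟨hx1, hxdvd⟩
    have hxdvd' : x.toNat ∣ N.natAbs * N.natAbs := by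
      have hxa : x = (x.toNat : Int) := (Int.toNat_of_nonneg (by omega)).symm
      rw [hxa, ← hNN] at hxdvd
      exact_mod_cast hxdvd
    obtain ⟨a, b, hadvd, hbdvd, hab⟩ := pv_nat_split N.natAbs x.toNat hxdvd'
    have ha1 : 1 ≤ a := by
      rcases Nat.eq_zero_or_pos a with h | h
      · subst h; simp at hab; omega
      · exact h
    have hb1 : 1 ≤ b := by
      rcases Nat.eq_zero_or_pos b with h | h
      · subst h; simp at hab; omega
      · exact h
    refine ⟨(a : Int), ?_, (b : Int), ?_, ?_⟩
    · rw [pv_mem_small N _ hm]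
      exact ⟨by exact_mod_cast ha1, by exact_mod_cast hadvd⟩
    · rw [pv_mem_small N _ hm]
      exact ⟨by exact_mod_cast hb1, by exact_mod_cast hbdvd⟩
    · have hx : x = ((a * b : Nat) : Int) := by rw [← hab]; omega
      rw [hx]; push_cast; ring

lemma pv_cond_iff (N d : Int) :
    (d ∈ PySem.List.pyRange 1 ((N.natAbs : Int) + 1) ∧ pvPA N d = true) ↔
      (1 ≤ d ∧ d ∣ N * N ∧ pvPB N d = true) := by
  simp only [PySem.List.mem_pyRange_one, pvPA, Bool.and_eq_true, decide_eq_true_eq]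
  constructor
  · rintro ⟨⟨h1, _⟩, hmod, hB, _⟩
    exact ⟨h1, (PySem.Int.mod_eq_zero_iff_dvd _ _).mp hmod, hB⟩
  · rintro ⟨h1, hdvd, hB⟩
    have hd0 : (0 : Int) < d := h1
    have hBB := hB
    rw [pvPB, decide_eq_true_eq] at hBB
    obtain ⟨hde, hpar⟩ := hBB
    have hpar' : (2 : Int) ∣ (d + PySem.Int.floordiv (N * N) d) :=
      (PySem.Int.mod_eq_zero_iff_dvd _ _).mp hpar
    obtain ⟨k, hk⟩ := hpar'
    have he : PySem.Int.floordiv (N * N) d = 2 * k - d := by omega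
    have hprod : d * ((N * N) / d) = N * N := Int.mul_ediv_cancel' hdvd
    have he' : (N * N) / d = 2 * k - d := by
      rw [← PySem.Int.floordiv_eq_ediv_of_pos hd0]; omega
    have hprod2 : d * (2 * k - d) = N * N := by rw [← he']; exact hprod
    have hdk : d < k := by rw [he] at hde; omega
    have hb2 : PySem.Int.floordiv (PySem.Int.floordiv (N * N) d - d) 2 = k - d := by
      rw [he]
      have h2 : 2 * k - d - d = 2 * (k - d) := by ring
      rw [h2, PySem.Int.floordiv_eq_ediv_of_pos (by norm_num : (0:Int) < 2),
        Int.mul_ediv_cancel_left _ (by norm_num : (2:Int) ≠ 0)]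
    have hc2 : PySem.Int.floordiv (d + PySem.Int.floordiv (N * N) d) 2 = k := by
      rw [he]
      have h2 : d + (2 * k - d) = 2 * k := by ring
      rw [h2, PySem.Int.floordiv_eq_ediv_of_pos (by norm_num : (0:Int) < 2),
        Int.mul_ediv_cancel_left _ (by norm_num : (2:Int) ≠ 0)]
    have hNN : ((N.natAbs : Int)) * ((N.natAbs : Int)) = N * N := by
      exact_mod_cast Int.natAbs_mul_self (a := N)
    have hmnn : (0 : Int) ≤ (N.natAbs : Int) := by positivity
    refine ⟨⟨h1, ?_⟩, (PySem.Int.mod_eq_zero_iff_dvd _ _).mpr hdvd, hB, ?_, ?_⟩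
    · nlinarith [hprod2, hdk, hd0, hNN, hmnn]
    · rw [hb2]; omega
    · rw [hb2, hc2]; linear_combination (-1 : Int) * hprod2

lemma pv_filters_eq (N : Int) :
    (PySem.List.pyRange 1 ((N.natAbs : Int) + 1)).filter (pvPA N) =
      (PySem.List.sorted (PySem.Set.ofList (pvProds N)) (fun x => x) false).filter (pvPB N) := by
  rcases Nat.eq_zero_or_pos N.natAbs with h0 | hm
  · have hN : N = 0 := by omega
    subst hN; decide
  · have hmem : ∀ d : Int,
        d ∈ (PySem.List.pyRange 1 ((N.natAbs : Int) + 1)).filter (pvPA N) ↔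
          d ∈ (PySem.List.sorted (PySem.Set.ofList (pvProds N)) (fun x => x) false).filter (pvPB N) := by
      intro d
      simp only [List.mem_filter]
      constructor
      · rintro ⟨hd1, hd2⟩
        obtain ⟨h1, hdvd, hB⟩ := (pv_cond_iff N d).mp ⟨hd1, hd2⟩
        refine ⟨?_, hB⟩
        rw [PySem.List.mem_sorted, PySem.Set.mem_ofList]
        exact (pv_mem_prods N d hm).mpr ⟨h1, hdvd⟩
      · rintro ⟨hd1, hd2⟩
        rw [PySem.List.mem_sorted, PySem.Set.mem_ofList] at hd1
        obtain ⟨h1, hdvd⟩ := (pv_mem_prods N d hm).mp hd1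
        exact (pv_cond_iff N d).mpr ⟨h1, hdvd, hd2⟩
    have hpA : ((PySem.List.pyRange 1 ((N.natAbs : Int) + 1)).filter (pvPA N)).Pairwise (· < ·) :=
      (PySem.List.pairwise_lt_pyRange_one 1 _).filter _
    have hpB : ((PySem.List.sorted (PySem.Set.ofList (pvProds N)) (fun x => x) false).filter (pvPB N)).Pairwise (· < ·) :=
      (PySem.List.sorted_ofList_pairwise_lt (pvProds N)).filter _
    have hperm : ((PySem.List.pyRange 1 ((N.natAbs : Int) + 1)).filter (pvPA N)).Perm
        ((PySem.List.sorted (PySem.Set.ofList (pvProds N)) (fun x => x) false).filter (pvPB N)) :=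
      (List.perm_ext_iff_of_nodup
        (List.Pairwise.imp (fun h => ne_of_lt h) hpA)
        (List.Pairwise.imp (fun h => ne_of_lt h) hpB)).mpr hmem
    have e1 := PySem.List.sorted_eq_of_perm_of_pairwise_lt
      ((PySem.List.sorted (PySem.Set.ofList (pvProds N)) (fun x => x) false).filter (pvPB N))
      ((PySem.List.pyRange 1 ((N.natAbs : Int) + 1)).filter (pvPA N)) (fun x => x) hperm hpA
    have e2 := PySem.List.sorted_eq_of_perm_of_pairwise_lt
      ((PySem.List.sorted (PySem.Set.ofList (pvProds N)) (fun x => x) false).filter (pvPB N))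
      ((PySem.List.sorted (PySem.Set.ofList (pvProds N)) (fun x => x) false).filter (pvPB N)) (fun x => x)
      (List.Perm.refl _) hpB
    exact e1.symm.trans e2

-- ===== VERDICT (by name: the statement is the Claim_ definition above) =====
theorem all_triples_with_leg_spec : Claim_equal_all_triples_with_leg := by
  intro N ms _
  show all_triples_with_leg N ms = all_triples_with_leg_alt N ms
  rw [pvA_shape, pvB_shape, ← pv_filters_eq]
  have h1 : (N * N).toNat = N.natAbs * N.natAbs := by
    rw [← Int.natAbs_mul_self]; exact Int.toNat_natCast _
  have h2 : (N * N).toNat.sqrt = N.natAbs := by rw [h1, ← pow_two, Nat.sqrt_eq']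
  rw [h2]
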